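-- pv_equiv track=rewrite | github.com/adrianodennanni/FemtoMIPS | assembler/assemblerInt.py | stringBin
-- ===== SOURCE A (Python) =====
-- def stringBin(nm, ln):
--     ret = ""
--     if nm < 0:
--         nm = 2**ln + nm
--     for i in range(ln):
--         ret = str(nm % 2) + ret
--         nm = nm // 2
--     return ret
-- ===== SOURCE B (Python) =====
-- def stringBin(nm, ln):
--     if ln <= 0:
--         return ""
--     return bin(nm % (2 ** ln))[2:].zfill(ln)
-- ===== Notes on version B (the rewrite author's own statement) =====
-- stated objective: faster
-- what changed: replaces the per-bit divide-and-prepend loop (with a separate negative-number adjustment) by one modulo reduction to the low ln bits followed by a single library binary-format-and-pad call (bin(...)[2:].zfill(ln))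
import Mathlib
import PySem

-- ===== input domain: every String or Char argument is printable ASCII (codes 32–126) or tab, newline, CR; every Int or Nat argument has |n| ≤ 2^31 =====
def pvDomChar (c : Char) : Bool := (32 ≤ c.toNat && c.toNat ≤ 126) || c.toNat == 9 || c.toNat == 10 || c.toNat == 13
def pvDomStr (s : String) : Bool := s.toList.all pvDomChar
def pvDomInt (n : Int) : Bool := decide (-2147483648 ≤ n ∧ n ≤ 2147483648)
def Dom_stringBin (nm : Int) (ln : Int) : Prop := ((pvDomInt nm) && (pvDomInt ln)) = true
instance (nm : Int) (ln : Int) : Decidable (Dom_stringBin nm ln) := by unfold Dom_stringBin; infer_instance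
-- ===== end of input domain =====

-- B replaces A's per-bit divide-and-prepend loop by one modulo reduction to the low ln bits
-- followed by a single binary-render-and-zero-pad step (bin(...)[2:].zfill(ln)).


-- ===== PORT A =====
-- the loop 'for i in range(ln): ret = str(nm % 2) + ret; nm = nm // 2' (i unused): ln.toNat iterations
def stringBinLoop (nm : Int) (k : Nat) (ret : String) : String :=
  match k with
  | 0 => ret
  | Nat.succ k' => stringBinLoop (PySem.Int.floordiv nm 2) k' (PySem.Int.toStr (PySem.Int.mod nm 2) ++ ret)

-- 'if nm < 0: nm = 2**ln + nm'.  (When ln < 0 Python's 2**ln is a float, but the loop is then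
-- empty and the function returns "" without touching the adjusted nm; the port's 2 ^ ln.toNat
-- value is likewise never used in that case, so the port is exact for every ln.)
def stringBin (nm : Int) (ln : Int) : String :=
  let nm' := if nm < 0 then 2 ^ ln.toNat + nm else nm
  stringBinLoop nm' ln.toNat ""

-- ===== PORT B =====
-- bin(v)[2:] for v ≥ 0: big-endian binary digits, '0' for zero
def binDigits (v : Nat) : List Char :=
  if v = 0 then ['0'] else ((Nat.digits 2 v).map (fun d => Char.ofNat (48 + d))).reverse

def stringBin_alt (nm : Int) (ln : Int) : String :=
  if ln ≤ 0 then ""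
  else PySem.Str.zfill (String.ofList (binDigits (PySem.Int.mod nm (2 ^ ln.toNat)).toNat)) ln

-- ===== PRECONDITION & SPEC =====
def Spec_stringBin (nm : Int) (ln : Int) (out : String) : Prop := out = stringBin_alt nm ln
instance (nm : Int) (ln : Int) (out : String) : Decidable (Spec_stringBin nm ln out) := by unfold Spec_stringBin; infer_instance

-- ===== CLAIM (what is proved, stated in full; the proofs are below) =====
def Claim_equal_stringBin : Prop := ∀ (nm : Int) (ln : Int), Dom_stringBin nm ln → Spec_stringBin nm ln (stringBin nm ln)

-- ===== LEMMAS AND PROOFS =====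

-- fixed-width big-endian binary rendering of v, width k (zero-padded on the left)
def pad (k : Nat) (v : Nat) : List Char :=
  List.replicate (k - (Nat.digits 2 v).length) '0' ++ ((Nat.digits 2 v).map (fun d => Char.ofNat (48 + d))).reverse

lemma pad_succ (k v : Nat) : pad (k + 1) v = pad k (v / 2) ++ [Char.ofNat (48 + v % 2)] := by
  by_cases hv : v = 0
  · subst hv
    simp [pad, List.replicate_succ']
  · rw [pad, pad, Nat.digits_def' (by norm_num : (1:ℕ) < 2) (Nat.pos_of_ne_zero hv)]
    simp [List.append_assoc]

lemma loop_eq (k : Nat) : ∀ (nm : Int) (ret : String),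
    stringBinLoop nm k ret = String.ofList (pad k ((nm % ((2:Int) ^ k)).toNat) ++ ret.toList) := by
  induction k with
  | zero =>
      intro nm ret
      simp [stringBinLoop, pad]
  | succ k ih =>
      intro nm ret
      have h2 : (0:Int) < 2 := by norm_num
      have hP : (0:Int) < 2 ^ k := by positivity
      rw [stringBinLoop, ih, PySem.Int.floordiv_eq_ediv_of_pos h2, PySem.Int.mod_eq_emod_of_pos h2]
      set M : Int := nm % (2 ^ (k + 1)) with hM
      have hMnn : 0 ≤ M := Int.emod_nonneg nm (by positivity)
      have hMlt : M < 2 ^ (k + 1) := Int.emod_lt_of_pos nm (by positivity)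
      -- nm / 2 ≡ M / 2 modulo 2^k
      have hsplit : nm = M + 2 * (2 ^ k * (nm / 2 ^ (k + 1))) := by
        have := Int.mul_ediv_add_emod nm (2 ^ (k + 1))
        rw [← hM] at this; ring_nf; ring_nf at this; omega
      have hdiv : nm / 2 = M / 2 + 2 ^ k * (nm / 2 ^ (k + 1)) := by
        conv_lhs => rw [hsplit]
        rw [Int.add_mul_ediv_left _ _ (by norm_num : (2:Int) ≠ 0)]
      have hmodk : (nm / 2) % 2 ^ k = M / 2 := by
        rw [hdiv, Int.add_mul_emod_self_left]
        exact Int.emod_eq_of_lt (Int.ediv_nonneg hMnn (by norm_num)) (by omega)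
      have hmod2 : nm % 2 = M % 2 := by
        rw [hM, Int.emod_emod_of_dvd nm ⟨2 ^ k, by ring⟩]
      -- digit character: nm % 2 is 0 or 1
      have hb : nm % 2 = 0 ∨ nm % 2 = 1 := by omega
      have hchar : (PySem.Int.toStr (nm % 2)).toList = [Char.ofNat (48 + M.toNat % 2)] := by
        rcases hb with h | h <;> rw [h] <;> rw [show M.toNat % 2 = (M % 2).toNat by omega, ← hmod2, h] <;> decide
      rw [hmodk, pad_succ, show (M / 2).toNat = M.toNat / 2 by omega]
      simp [hchar, List.append_assoc]

lemma zfill_nosign (c : Char) (rest : List Char) (w : Int) (hc : ¬(c = '+' ∨ c = '-'))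
    (hw : ¬ w ≤ ((c :: rest : List Char).length : Int)) :
    PySem.Chars.zfill (c :: rest) w
      = List.replicate (w.toNat - (c :: rest : List Char).length) '0' ++ c :: rest := by
  rw [PySem.Chars.zfill.eq_def, if_neg hw]
  exact if_neg hc

lemma pad_eq_zfill (n v : Nat) (hn : 1 ≤ n) (hv : v < 2 ^ n) :
    PySem.Chars.zfill (binDigits v) (n : Int) = pad n v := by
  by_cases hv0 : v = 0
  · subst hv0
    simp only [binDigits, pad, Nat.digits_zero, List.length_nil, List.map_nil, if_true,
      List.reverse_nil, List.append_nil, Nat.sub_zero]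
    rcases Nat.eq_or_lt_of_le hn with h1 | h1
    · rw [PySem.Chars.zfill.eq_def, if_pos (by simp [← h1])]
      simp [← h1]
    · rw [zfill_nosign '0' [] n (by decide) (by simp; omega)]
      rw [show List.replicate n '0' = List.replicate (n - 1) '0' ++ ['0'] by
        conv_lhs => rw [show n = (n - 1) + 1 by omega]
        exact (List.replicate_succ' (n := n - 1) (a := '0')).symm ▸ rfl]
      simp
  · have hpos : 0 < v := Nat.pos_of_ne_zero hv0
    have hlen : (Nat.digits 2 v).length ≤ n := (Nat.digits_length_le_iff (by norm_num) v).mpr hv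
    have hne : Nat.digits 2 v ≠ [] := Nat.digits_ne_nil_iff_ne_zero.mpr hv0
    rw [binDigits, if_neg hv0]
    have hL : (((Nat.digits 2 v).map (fun d => Char.ofNat (48 + d))).reverse).length
        = (Nat.digits 2 v).length := by simp
    by_cases hle : (n : Int) ≤ ((((Nat.digits 2 v).map (fun d => Char.ofNat (48 + d))).reverse).length : Int)
    · rw [PySem.Chars.zfill.eq_def, if_pos hle]
      rw [hL] at hle
      have : (Nat.digits 2 v).length = n := by omega
      rw [pad, this]
      simp
    · obtain ⟨c, rest, hcr⟩ := List.exists_cons_of_ne_nil (by simp [hne] :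
          (((Nat.digits 2 v).map (fun d => Char.ofNat (48 + d))).reverse) ≠ [])
      have hcmem : c ∈ ((Nat.digits 2 v).map (fun d => Char.ofNat (48 + d))) := by
        have : c ∈ (((Nat.digits 2 v).map (fun d => Char.ofNat (48 + d))).reverse) := by
          rw [hcr]; exact List.mem_cons_self
        simpa using this
      obtain ⟨d, hd, hdc⟩ := List.mem_map.mp hcmem
      have hd2 : d < 2 := Nat.digits_lt_base (by norm_num) hd
      have hcne : ¬ (c = '+' ∨ c = '-') := by
        subst hdc
        interval_cases d <;> decide
      rw [hcr] at hle ⊢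
      rw [zfill_nosign c rest n hcne hle, ← hcr, pad]
      congr 2
      rw [hL]
      omega

lemma alt_eq_pad (nm : Int) (n : Nat) (hn : 1 ≤ n) :
    PySem.Str.zfill (String.ofList (binDigits (PySem.Int.mod nm ((2:Int) ^ n)).toNat)) (n : Int)
      = String.ofList (pad n ((nm % ((2:Int) ^ n)).toNat)) := by
  have hP : (0:Int) < 2 ^ n := by positivity
  rw [PySem.Int.mod_eq_emod_of_pos hP]
  have hvlt : ((nm % ((2:Int) ^ n)).toNat) < 2 ^ n := by
    have h1 : nm % ((2:Int) ^ n) < 2 ^ n := Int.emod_lt_of_pos nm hP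
    have h2 : ((2:Int) ^ n) = ((2 ^ n : Nat) : Int) := by push_cast; ring
    omega
  apply String.toList_injective
  rw [PySem.Str.toList_zfill]
  simp only [String.toList_ofList]
  exact pad_eq_zfill n _ hn hvlt

-- ===== VERDICT (by name: the statement is the Claim_ definition above) =====
theorem stringBin_spec : Claim_equal_stringBin := by
  intro nm ln _
  unfold Spec_stringBin stringBin stringBin_alt
  by_cases hln : ln ≤ 0
  · rw [if_pos hln]
    have : ln.toNat = 0 := by omega
    simp only [this]
    rfl
  · rw [if_neg hln]
    push Not at hln
    set n := ln.toNat with hn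
    have hn1 : 1 ≤ n := by omega
    have hcast : ((n : Int)) = ln := by omega
    rw [loop_eq]
    have hmod : (if nm < 0 then 2 ^ n + nm else nm) % ((2:Int) ^ n) = nm % ((2:Int) ^ n) := by
      split
      · rw [add_comm, Int.add_emod_right]
      · rfl
    rw [hmod, ← hcast, alt_eq_pad nm n hn1]
    simp
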